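-- pv_equiv track=rewrite | github.com/atovk/baby-tracker | src/baby_tracker/services/baby_service.py | _get_upcoming_milestones
-- ===== SOURCE A (Python) =====
-- from typing import List, Optional, Dict, Any
--
-- def _get_upcoming_milestones(age_days: int) -> List[str]:
--     """获取即将到来的里程碑"""
--     milestones = []
--
--     milestone_map = {
--         7: "一周大了！",
--         14: "两周大了！",
--         30: "满月了！",
--         60: "两个月大了！",
--         90: "三个月大了！",
--         180: "半岁了！",
--         365: "一岁生日！",
--         730: "两岁生日！",
--     }
--
--     for days, milestone in milestone_map.items():
--         if age_days < days <= age_days + 7:  # 接下来一周内的里程碑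
--             milestones.append(f"{days - age_days}天后：{milestone}")
--
--     return milestones
-- ===== SOURCE B (Python) =====
-- from typing import List
--
--
-- def _get_upcoming_milestones(age_days: int) -> List[str]:
--     """获取即将到来的里程碑
--
--     Milestones are at least 7 days apart, so at most one can fall in the
--     coming week: scan for the next milestone after age_days (keys are in
--     ascending order) and report it iff it is within 7 days.
--     """
--     milestone_map = {
--         7: "一周大了！",
--         14: "两周大了！",
--         30: "满月了！",
--         60: "两个月大了！",
--         90: "三个月大了！",
--         180: "半岁了！",
--         365: "一岁生日！",
--         730: "两岁生日！",
--     }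
--
--     for days, milestone in milestone_map.items():
--         if days > age_days:
--             if days <= age_days + 7:
--                 return [f"{days - age_days}天后：{milestone}"]
--             return []
--     return []
-- ===== Notes on version B (the rewrite author's own statement) =====
-- stated objective: simpler
-- what changed: Instead of filtering every milestone_map entry against the one-week window, B scans the ascending milestone days for the first one after age_days and returns early: it is the only candidate (milestones are >= 7 days apart), reported iff it is within 7 days.
import Mathlib
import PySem

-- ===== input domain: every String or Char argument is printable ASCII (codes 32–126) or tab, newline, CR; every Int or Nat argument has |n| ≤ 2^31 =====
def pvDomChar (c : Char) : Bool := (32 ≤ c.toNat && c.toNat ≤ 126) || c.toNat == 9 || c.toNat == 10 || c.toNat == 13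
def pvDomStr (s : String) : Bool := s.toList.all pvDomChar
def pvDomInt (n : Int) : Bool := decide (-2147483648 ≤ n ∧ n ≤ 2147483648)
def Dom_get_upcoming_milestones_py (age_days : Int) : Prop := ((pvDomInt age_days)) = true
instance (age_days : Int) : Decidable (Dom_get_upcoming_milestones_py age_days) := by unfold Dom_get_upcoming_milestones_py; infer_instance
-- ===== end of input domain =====

-- B replaces A's scan over all milestone entries by an early-exit search for the
-- next milestone (the keys are ≥ 7 days apart, so at most one lies in the coming
-- week); objective: simpler. Equal output on every input (both are total).

-- ===== PORT A =====
def get_upcoming_milestones_py (age_days : Int) : List String :=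
  let milestone_map : PySem.Dict Int String := PySem.Dict.mk
    [(7, "一周大了！"), (14, "两周大了！"), (30, "满月了！"), (60, "两个月大了！"),
     (90, "三个月大了！"), (180, "半岁了！"), (365, "一岁生日！"), (730, "两岁生日！")]
  milestone_map.items.foldl
    (fun milestones kv =>
      if age_days < kv.1 ∧ kv.1 ≤ age_days + 7 then
        milestones ++ [PySem.Int.toStr (kv.1 - age_days) ++ "天后：" ++ kv.2]
      else milestones) []

-- ===== PORT B =====
-- early-exit 'for … return' loop of Source B, as structural recursion over the items
def altLoop (age_days : Int) : List (Int × String) → List String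
  | [] => []
  | (days, milestone) :: rest =>
    if age_days < days then
      if days ≤ age_days + 7 then
        [PySem.Int.toStr (days - age_days) ++ "天后：" ++ milestone]
      else []
    else altLoop age_days rest

def get_upcoming_milestones_py_alt (age_days : Int) : List String :=
  let milestone_map : PySem.Dict Int String := PySem.Dict.mk
    [(7, "一周大了！"), (14, "两周大了！"), (30, "满月了！"), (60, "两个月大了！"),
     (90, "三个月大了！"), (180, "半岁了！"), (365, "一岁生日！"), (730, "两岁生日！")]
  altLoop age_days milestone_map.items

-- ===== PRECONDITION & SPEC =====
def Spec_get_upcoming_milestones_py (age_days : Int) (out : List String) : Prop := out = get_upcoming_milestones_py_alt age_days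
instance (age_days : Int) (out : List String) : Decidable (Spec_get_upcoming_milestones_py age_days out) := by unfold Spec_get_upcoming_milestones_py; infer_instance

-- ===== CLAIM (what is proved, stated in full; the proofs are below) =====
def Claim_equal_get_upcoming_milestones_py : Prop := ∀ (age_days : Int), Dom_get_upcoming_milestones_py age_days → Spec_get_upcoming_milestones_py age_days (get_upcoming_milestones_py age_days)

-- ===== LEMMAS AND PROOFS =====
-- case analysis on the 16 intervals cut out by the milestone days k and k-7;
-- on each interval every branch condition of both ports is decided by omega
theorem get_upcoming_milestones_eq (age_days : Int) :
    get_upcoming_milestones_py age_days = get_upcoming_milestones_py_alt age_days := by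
    by_cases h0 : age_days < 0
    · simp [get_upcoming_milestones_py, get_upcoming_milestones_py_alt, altLoop, List.foldl, (show age_days < 7 by omega), (show ¬((7:Int) ≤ age_days + 7) by omega), (show age_days < 14 by omega), (show ¬((14:Int) ≤ age_days + 7) by omega), (show age_days < 30 by omega), (show ¬((30:Int) ≤ age_days + 7) by omega), (show age_days < 60 by omega), (show ¬((60:Int) ≤ age_days + 7) by omega), (show age_days < 90 by omega), (show ¬((90:Int) ≤ age_days + 7) by omega), (show age_days < 180 by omega), (show ¬((180:Int) ≤ age_days + 7) by omega), (show age_days < 365 by omega), (show ¬((365:Int) ≤ age_days + 7) by omega), (show age_days < 730 by omega), (show ¬((730:Int) ≤ age_days + 7) by omega)]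
    by_cases h1 : age_days < 7
    · simp [get_upcoming_milestones_py, get_upcoming_milestones_py_alt, altLoop, List.foldl, (show age_days < 7 by omega), (show (7:Int) ≤ age_days + 7 by omega), (show age_days < 14 by omega), (show ¬((14:Int) ≤ age_days + 7) by omega), (show age_days < 30 by omega), (show ¬((30:Int) ≤ age_days + 7) by omega), (show age_days < 60 by omega), (show ¬((60:Int) ≤ age_days + 7) by omega), (show age_days < 90 by omega), (show ¬((90:Int) ≤ age_days + 7) by omega), (show age_days < 180 by omega), (show ¬((180:Int) ≤ age_days + 7) by omega), (show age_days < 365 by omega), (show ¬((365:Int) ≤ age_days + 7) by omega), (show age_days < 730 by omega), (show ¬((730:Int) ≤ age_days + 7) by omega)]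
    by_cases h2 : age_days < 14
    · simp [get_upcoming_milestones_py, get_upcoming_milestones_py_alt, altLoop, List.foldl, (show ¬(age_days < 7) by omega), (show (7:Int) ≤ age_days + 7 by omega), (show age_days < 14 by omega), (show (14:Int) ≤ age_days + 7 by omega), (show age_days < 30 by omega), (show ¬((30:Int) ≤ age_days + 7) by omega), (show age_days < 60 by omega), (show ¬((60:Int) ≤ age_days + 7) by omega), (show age_days < 90 by omega), (show ¬((90:Int) ≤ age_days + 7) by omega), (show age_days < 180 by omega), (show ¬((180:Int) ≤ age_days + 7) by omega), (show age_days < 365 by omega), (show ¬((365:Int) ≤ age_days + 7) by omega), (show age_days < 730 by omega), (show ¬((730:Int) ≤ age_days + 7) by omega)]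
    by_cases h3 : age_days < 23
    · simp [get_upcoming_milestones_py, get_upcoming_milestones_py_alt, altLoop, List.foldl, (show ¬(age_days < 7) by omega), (show (7:Int) ≤ age_days + 7 by omega), (show ¬(age_days < 14) by omega), (show (14:Int) ≤ age_days + 7 by omega), (show age_days < 30 by omega), (show ¬((30:Int) ≤ age_days + 7) by omega), (show age_days < 60 by omega), (show ¬((60:Int) ≤ age_days + 7) by omega), (show age_days < 90 by omega), (show ¬((90:Int) ≤ age_days + 7) by omega), (show age_days < 180 by omega), (show ¬((180:Int) ≤ age_days + 7) by omega), (show age_days < 365 by omega), (show ¬((365:Int) ≤ age_days + 7) by omega), (show age_days < 730 by omega), (show ¬((730:Int) ≤ age_days + 7) by omega)]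
    by_cases h4 : age_days < 30
    · simp [get_upcoming_milestones_py, get_upcoming_milestones_py_alt, altLoop, List.foldl, (show ¬(age_days < 7) by omega), (show (7:Int) ≤ age_days + 7 by omega), (show ¬(age_days < 14) by omega), (show (14:Int) ≤ age_days + 7 by omega), (show age_days < 30 by omega), (show (30:Int) ≤ age_days + 7 by omega), (show age_days < 60 by omega), (show ¬((60:Int) ≤ age_days + 7) by omega), (show age_days < 90 by omega), (show ¬((90:Int) ≤ age_days + 7) by omega), (show age_days < 180 by omega), (show ¬((180:Int) ≤ age_days + 7) by omega), (show age_days < 365 by omega), (show ¬((365:Int) ≤ age_days + 7) by omega), (show age_days < 730 by omega), (show ¬((730:Int) ≤ age_days + 7) by omega)]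
    by_cases h5 : age_days < 53
    · simp [get_upcoming_milestones_py, get_upcoming_milestones_py_alt, altLoop, List.foldl, (show ¬(age_days < 7) by omega), (show (7:Int) ≤ age_days + 7 by omega), (show ¬(age_days < 14) by omega), (show (14:Int) ≤ age_days + 7 by omega), (show ¬(age_days < 30) by omega), (show (30:Int) ≤ age_days + 7 by omega), (show age_days < 60 by omega), (show ¬((60:Int) ≤ age_days + 7) by omega), (show age_days < 90 by omega), (show ¬((90:Int) ≤ age_days + 7) by omega), (show age_days < 180 by omega), (show ¬((180:Int) ≤ age_days + 7) by omega), (show age_days < 365 by omega), (show ¬((365:Int) ≤ age_days + 7) by omega), (show age_days < 730 by omega), (show ¬((730:Int) ≤ age_days + 7) by omega)]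
    by_cases h6 : age_days < 60
    · simp [get_upcoming_milestones_py, get_upcoming_milestones_py_alt, altLoop, List.foldl, (show ¬(age_days < 7) by omega), (show (7:Int) ≤ age_days + 7 by omega), (show ¬(age_days < 14) by omega), (show (14:Int) ≤ age_days + 7 by omega), (show ¬(age_days < 30) by omega), (show (30:Int) ≤ age_days + 7 by omega), (show age_days < 60 by omega), (show (60:Int) ≤ age_days + 7 by omega), (show age_days < 90 by omega), (show ¬((90:Int) ≤ age_days + 7) by omega), (show age_days < 180 by omega), (show ¬((180:Int) ≤ age_days + 7) by omega), (show age_days < 365 by omega), (show ¬((365:Int) ≤ age_days + 7) by omega), (show age_days < 730 by omega), (show ¬((730:Int) ≤ age_days + 7) by omega)]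
    by_cases h7 : age_days < 83
    · simp [get_upcoming_milestones_py, get_upcoming_milestones_py_alt, altLoop, List.foldl, (show ¬(age_days < 7) by omega), (show (7:Int) ≤ age_days + 7 by omega), (show ¬(age_days < 14) by omega), (show (14:Int) ≤ age_days + 7 by omega), (show ¬(age_days < 30) by omega), (show (30:Int) ≤ age_days + 7 by omega), (show ¬(age_days < 60) by omega), (show (60:Int) ≤ age_days + 7 by omega), (show age_days < 90 by omega), (show ¬((90:Int) ≤ age_days + 7) by omega), (show age_days < 180 by omega), (show ¬((180:Int) ≤ age_days + 7) by omega), (show age_days < 365 by omega), (show ¬((365:Int) ≤ age_days + 7) by omega), (show age_days < 730 by omega), (show ¬((730:Int) ≤ age_days + 7) by omega)]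
    by_cases h8 : age_days < 90
    · simp [get_upcoming_milestones_py, get_upcoming_milestones_py_alt, altLoop, List.foldl, (show ¬(age_days < 7) by omega), (show (7:Int) ≤ age_days + 7 by omega), (show ¬(age_days < 14) by omega), (show (14:Int) ≤ age_days + 7 by omega), (show ¬(age_days < 30) by omega), (show (30:Int) ≤ age_days + 7 by omega), (show ¬(age_days < 60) by omega), (show (60:Int) ≤ age_days + 7 by omega), (show age_days < 90 by omega), (show (90:Int) ≤ age_days + 7 by omega), (show age_days < 180 by omega), (show ¬((180:Int) ≤ age_days + 7) by omega), (show age_days < 365 by omega), (show ¬((365:Int) ≤ age_days + 7) by omega), (show age_days < 730 by omega), (show ¬((730:Int) ≤ age_days + 7) by omega)]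
    by_cases h9 : age_days < 173
    · simp [get_upcoming_milestones_py, get_upcoming_milestones_py_alt, altLoop, List.foldl, (show ¬(age_days < 7) by omega), (show (7:Int) ≤ age_days + 7 by omega), (show ¬(age_days < 14) by omega), (show (14:Int) ≤ age_days + 7 by omega), (show ¬(age_days < 30) by omega), (show (30:Int) ≤ age_days + 7 by omega), (show ¬(age_days < 60) by omega), (show (60:Int) ≤ age_days + 7 by omega), (show ¬(age_days < 90) by omega), (show (90:Int) ≤ age_days + 7 by omega), (show age_days < 180 by omega), (show ¬((180:Int) ≤ age_days + 7) by omega), (show age_days < 365 by omega), (show ¬((365:Int) ≤ age_days + 7) by omega), (show age_days < 730 by omega), (show ¬((730:Int) ≤ age_days + 7) by omega)]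
    by_cases h10 : age_days < 180
    · simp [get_upcoming_milestones_py, get_upcoming_milestones_py_alt, altLoop, List.foldl, (show ¬(age_days < 7) by omega), (show (7:Int) ≤ age_days + 7 by omega), (show ¬(age_days < 14) by omega), (show (14:Int) ≤ age_days + 7 by omega), (show ¬(age_days < 30) by omega), (show (30:Int) ≤ age_days + 7 by omega), (show ¬(age_days < 60) by omega), (show (60:Int) ≤ age_days + 7 by omega), (show ¬(age_days < 90) by omega), (show (90:Int) ≤ age_days + 7 by omega), (show age_days < 180 by omega), (show (180:Int) ≤ age_days + 7 by omega), (show age_days < 365 by omega), (show ¬((365:Int) ≤ age_days + 7) by omega), (show age_days < 730 by omega), (show ¬((730:Int) ≤ age_days + 7) by omega)]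
    by_cases h11 : age_days < 358
    · simp [get_upcoming_milestones_py, get_upcoming_milestones_py_alt, altLoop, List.foldl, (show ¬(age_days < 7) by omega), (show (7:Int) ≤ age_days + 7 by omega), (show ¬(age_days < 14) by omega), (show (14:Int) ≤ age_days + 7 by omega), (show ¬(age_days < 30) by omega), (show (30:Int) ≤ age_days + 7 by omega), (show ¬(age_days < 60) by omega), (show (60:Int) ≤ age_days + 7 by omega), (show ¬(age_days < 90) by omega), (show (90:Int) ≤ age_days + 7 by omega), (show ¬(age_days < 180) by omega), (show (180:Int) ≤ age_days + 7 by omega), (show age_days < 365 by omega), (show ¬((365:Int) ≤ age_days + 7) by omega), (show age_days < 730 by omega), (show ¬((730:Int) ≤ age_days + 7) by omega)]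
    by_cases h12 : age_days < 365
    · simp [get_upcoming_milestones_py, get_upcoming_milestones_py_alt, altLoop, List.foldl, (show ¬(age_days < 7) by omega), (show (7:Int) ≤ age_days + 7 by omega), (show ¬(age_days < 14) by omega), (show (14:Int) ≤ age_days + 7 by omega), (show ¬(age_days < 30) by omega), (show (30:Int) ≤ age_days + 7 by omega), (show ¬(age_days < 60) by omega), (show (60:Int) ≤ age_days + 7 by omega), (show ¬(age_days < 90) by omega), (show (90:Int) ≤ age_days + 7 by omega), (show ¬(age_days < 180) by omega), (show (180:Int) ≤ age_days + 7 by omega), (show age_days < 365 by omega), (show (365:Int) ≤ age_days + 7 by omega), (show age_days < 730 by omega), (show ¬((730:Int) ≤ age_days + 7) by omega)]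
    by_cases h13 : age_days < 723
    · simp [get_upcoming_milestones_py, get_upcoming_milestones_py_alt, altLoop, List.foldl, (show ¬(age_days < 7) by omega), (show (7:Int) ≤ age_days + 7 by omega), (show ¬(age_days < 14) by omega), (show (14:Int) ≤ age_days + 7 by omega), (show ¬(age_days < 30) by omega), (show (30:Int) ≤ age_days + 7 by omega), (show ¬(age_days < 60) by omega), (show (60:Int) ≤ age_days + 7 by omega), (show ¬(age_days < 90) by omega), (show (90:Int) ≤ age_days + 7 by omega), (show ¬(age_days < 180) by omega), (show (180:Int) ≤ age_days + 7 by omega), (show ¬(age_days < 365) by omega), (show (365:Int) ≤ age_days + 7 by omega), (show age_days < 730 by omega), (show ¬((730:Int) ≤ age_days + 7) by omega)]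
    by_cases h14 : age_days < 730
    · simp [get_upcoming_milestones_py, get_upcoming_milestones_py_alt, altLoop, List.foldl, (show ¬(age_days < 7) by omega), (show (7:Int) ≤ age_days + 7 by omega), (show ¬(age_days < 14) by omega), (show (14:Int) ≤ age_days + 7 by omega), (show ¬(age_days < 30) by omega), (show (30:Int) ≤ age_days + 7 by omega), (show ¬(age_days < 60) by omega), (show (60:Int) ≤ age_days + 7 by omega), (show ¬(age_days < 90) by omega), (show (90:Int) ≤ age_days + 7 by omega), (show ¬(age_days < 180) by omega), (show (180:Int) ≤ age_days + 7 by omega), (show ¬(age_days < 365) by omega), (show (365:Int) ≤ age_days + 7 by omega), (show age_days < 730 by omega), (show (730:Int) ≤ age_days + 7 by omega)]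
    simp [get_upcoming_milestones_py, get_upcoming_milestones_py_alt, altLoop, List.foldl, (show ¬(age_days < 7) by omega), (show (7:Int) ≤ age_days + 7 by omega), (show ¬(age_days < 14) by omega), (show (14:Int) ≤ age_days + 7 by omega), (show ¬(age_days < 30) by omega), (show (30:Int) ≤ age_days + 7 by omega), (show ¬(age_days < 60) by omega), (show (60:Int) ≤ age_days + 7 by omega), (show ¬(age_days < 90) by omega), (show (90:Int) ≤ age_days + 7 by omega), (show ¬(age_days < 180) by omega), (show (180:Int) ≤ age_days + 7 by omega), (show ¬(age_days < 365) by omega), (show (365:Int) ≤ age_days + 7 by omega), (show ¬(age_days < 730) by omega), (show (730:Int) ≤ age_days + 7 by omega)]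


-- ===== VERDICT (by name: the statement is the Claim_ definition above) =====
theorem get_upcoming_milestones_py_spec : Claim_equal_get_upcoming_milestones_py := by
  intro age_days _
  exact get_upcoming_milestones_eq age_days
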